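-- pv_equiv track=rewrite | github.com/chaeminsoo/coding_test | land_move.py | solution
-- ===== SOURCE A (Python) =====
-- def solution(land, height):
--     n = len(land)
--     parent = [i for i in range(n**2)]
--     path = []
--
--     def find_p(parent,x):
--         if parent[x] != x:
--             parent[x] = find_p(parent,parent[x])
--         return parent[x]
--
--     def union_p(parent,a,b):
--         a = find_p(parent,a)
--         b = find_p(parent,b)
--         if a < b:
--             parent[b] = a
--         else:
--             parent[a] = b
--
--     dx = [-1,1,0,0]
--     dy = [0,0,-1,1]
--
--     for i in range(n):
--         for j in range(n):
--             block_num = i*n + j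
--
--             for d in range(4):
--                 nx = i + dx[d]
--                 ny = j + dy[d]
--
--                 n_block_num = nx*n + ny
--
--                 if nx >= 0 and nx < n and ny >= 0 and ny < n:
--                     if abs(land[i][j]-land[nx][ny]) <= height:
--                         union_p(parent,block_num,n_block_num)
--                     else:
--                         path.append([abs(land[i][j]-land[nx][ny]),block_num,n_block_num])
--
--     path.sort()
--     ans = 0
--     for cost, b1, b2 in path:
--         if find_p(parent,b1) != find_p(parent,b2):
--             ans+=cost
--             union_p(parent,b1,b2)
--     return ans
-- ===== SOURCE B (Python) =====
-- def solution(land, height):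
--     # Kruskal by component *labels*: instead of a union-find forest with path
--     # compression, keep comp[cell] = smallest cell index of its component and
--     # merge by relabelling the whole array.
--     n = len(land)
--     comp = list(range(n * n))
--
--     def merge(comp, la, lb):
--         m = min(la, lb)
--         return [m if c == la or c == lb else c for c in comp]
--
--     edges = []
--     for i in range(n):
--         for j in range(n):
--             a = i * n + j
--             for di, dj in ((-1, 0), (1, 0), (0, -1), (0, 1)):
--                 x, y = i + di, j + dj
--                 if 0 <= x < n and 0 <= y < n:
--                     w = abs(land[i][j] - land[x][y])
--                     b = x * n + y
--                     if w <= height: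
--                         comp = merge(comp, comp[a], comp[b])
--                     else:
--                         edges.append((w, a, b))
--     edges.sort()
--     ans = 0
--     for w, a, b in edges:
--         la, lb = comp[a], comp[b]
--         if la != lb:
--             ans += w
--             comp = merge(comp, la, lb)
--     return ans
-- ===== Notes on version B (the rewrite author's own statement) =====
-- stated objective: alternative
-- what changed: A's recursive union-find with path compression (find_p/union_p over a parent array) is replaced by a component-label array where merging relabels every cell of the two components to their minimum label; the edge scan and sorted Kruskal sweep keep the same totals because labels always equal union-find roots.
import Mathlib
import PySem

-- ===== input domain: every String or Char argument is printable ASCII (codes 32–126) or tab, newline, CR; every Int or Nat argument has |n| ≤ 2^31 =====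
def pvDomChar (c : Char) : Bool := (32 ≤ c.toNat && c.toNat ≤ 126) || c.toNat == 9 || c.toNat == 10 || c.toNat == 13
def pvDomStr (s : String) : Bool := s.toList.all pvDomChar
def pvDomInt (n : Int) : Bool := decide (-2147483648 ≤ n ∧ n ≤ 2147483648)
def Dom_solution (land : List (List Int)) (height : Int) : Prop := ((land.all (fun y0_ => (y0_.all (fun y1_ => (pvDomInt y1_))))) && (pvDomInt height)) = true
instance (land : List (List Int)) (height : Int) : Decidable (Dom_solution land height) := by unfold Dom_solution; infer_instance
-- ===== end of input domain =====

-- B replaces A's recursive union-find (path compression + Kruskal) by a component-label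
-- array merged by relabelling; same Kruskal total, objective: alternative connectivity structure.

-- ===== PORT A =====
-- find_p, with a fuel guard (x.toNat+1 steps always suffice on executed inputs, since
-- parent[k] ≤ k is invariant and the parent chain strictly decreases; fuel-0 is unreachable).
def pvFindF : Nat → List Int → Int → List Int × Int
  | 0, parent, x => (parent, x)
  | f+1, parent, x =>
    let px := PySem.List.pyGetD parent x 0
    if px ≠ x then
      let pr := pvFindF f parent px
      (PySem.List.pySetD pr.1 x pr.2, pr.2)
    else (parent, x)

def pvFindP (parent : List Int) (x : Int) : List Int × Int := pvFindF (x.toNat + 1) parent x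

def pvUnionP (parent : List Int) (a b : Int) : List Int :=
  let fa := pvFindP parent a
  let fb := pvFindP fa.1 b
  if fa.2 < fb.2 then PySem.List.pySetD fb.1 fb.2 fa.2 else PySem.List.pySetD fb.1 fa.2 fb.2

-- land[i][j]; the pyGetD defaults are unreachable under Pre_solution
def pvLandA (land : List (List Int)) (i j : Int) : Int :=
  PySem.List.pyGetD (PySem.List.pyGetD land i []) j 0

def pvScanStepA (land : List (List Int)) (height n i j : Int)
    (st : List Int × List (Int × Int × Int)) (d : Int) : List Int × List (Int × Int × Int) :=
  let block := i * n + j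
  let nx := i + PySem.List.pyGetD [-1, 1, 0, 0] d 0
  let ny := j + PySem.List.pyGetD [0, 0, -1, 1] d 0
  let nblock := nx * n + ny
  if nx ≥ 0 ∧ nx < n ∧ ny ≥ 0 ∧ ny < n then
    if |pvLandA land i j - pvLandA land nx ny| ≤ height then
      (pvUnionP st.1 block nblock, st.2)
    else
      (st.1, st.2 ++ [(|pvLandA land i j - pvLandA land nx ny|, block, nblock)])
  else st

def solution (land : List (List Int)) (height : Int) : Int :=
  let n : Int := (land.length : Int)
  let parent0 := PySem.List.pyRange 0 (n ^ 2) 1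
  let scanned :=
    (PySem.List.pyRange 0 n 1).foldl (fun st i =>
      (PySem.List.pyRange 0 n 1).foldl (fun st j =>
        (PySem.List.pyRange 0 4 1).foldl (pvScanStepA land height n i j) st) st)
      (parent0, ([] : List (Int × Int × Int)))
  -- path.sort(): the 3-element lists [cost, b1, b2] compare lexicographically; the
  -- triples are sorted with the lexicographic list key, which is exact.
  let path := PySem.List.sorted scanned.2 (fun e => [e.1, e.2.1, e.2.2]) false
  let fin := path.foldl (fun (st : Int × List Int) e =>
      let f1 := pvFindP st.2 e.2.1
      let f2 := pvFindP f1.1 e.2.2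
      if f1.2 ≠ f2.2 then (st.1 + e.1, pvUnionP f2.1 e.2.1 e.2.2) else (st.1, f2.1))
    (0, scanned.1)
  fin.1

-- ===== PORT B =====
def pvMergeB (comp : List Int) (la lb : Int) : List Int :=
  let m := min la lb
  comp.map (fun c => if c = la ∨ c = lb then m else c)

def pvScanStepB (land : List (List Int)) (height n i j : Int)
    (st : List Int × List (Int × Int × Int)) (dd : Int × Int) : List Int × List (Int × Int × Int) :=
  let x := i + dd.1
  let y := j + dd.2
  if 0 ≤ x ∧ x < n ∧ 0 ≤ y ∧ y < n then
    -- land[i][j] via pyGetD; defaults unreachable under Pre_solution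
    let w := |PySem.List.pyGetD (PySem.List.pyGetD land i []) j 0 -
              PySem.List.pyGetD (PySem.List.pyGetD land x []) y 0|
    let a := i * n + j
    let b := x * n + y
    if w ≤ height then
      (pvMergeB st.1 (PySem.List.pyGetD st.1 a 0) (PySem.List.pyGetD st.1 b 0), st.2)
    else (st.1, st.2 ++ [(w, a, b)])
  else st

def solution_alt (land : List (List Int)) (height : Int) : Int :=
  let n : Int := (land.length : Int)
  let comp0 := PySem.List.pyRange 0 (n * n) 1
  let scanned :=
    (PySem.List.pyRange 0 n 1).foldl (fun st i =>
      (PySem.List.pyRange 0 n 1).foldl (fun st j =>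
        [((-1 : Int), (0 : Int)), (1, 0), (0, -1), (0, 1)].foldl
          (pvScanStepB land height n i j) st) st)
      (comp0, ([] : List (Int × Int × Int)))
  -- edges.sort(): tuples compare lexicographically; sorted with the lexicographic list key
  let edges := PySem.List.sorted scanned.2 (fun e => [e.1, e.2.1, e.2.2]) false
  let fin := edges.foldl (fun (st : Int × List Int) e =>
      let la := PySem.List.pyGetD st.2 e.2.1 0
      let lb := PySem.List.pyGetD st.2 e.2.2 0
      if la ≠ lb then (st.1 + e.1, pvMergeB st.2 la lb) else st)
    (0, scanned.1)
  fin.1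

-- ===== PRECONDITION & SPEC =====
-- A indexes land[i][j] for all i, j < len(land): a row shorter than len(land) raises
-- IndexError, so Pre_ admits exactly the inputs where every row has at least len(land) cells.
def Pre_solution (land : List (List Int)) (height : Int) : Prop :=
  ∀ row ∈ land, land.length ≤ row.length
instance (land : List (List Int)) (height : Int) : Decidable (Pre_solution land height) := by
  unfold Pre_solution; infer_instance
def pvWitness_solution : List (List Int) × Int := ([[1, 3], [2, 9]], 1)
def Spec_solution (land : List (List Int)) (height : Int) (out : Int) : Prop := out = solution_alt land height
instance (land : List (List Int)) (height : Int) (out : Int) : Decidable (Spec_solution land height out) := by unfold Spec_solution; infer_instance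

-- ===== CLAIM (what is proved, stated in full; the proofs are below) =====
def Claim_equal_solution : Prop := ∀ (land : List (List Int)) (height : Int), Dom_solution land height → Pre_solution land height → Spec_solution land height (solution land height)

-- ===== LEMMAS AND PROOFS =====

def pvRootF : Nat → List Int → Int → Int
  | 0, _, x => x
  | f+1, p, x =>
    let px := PySem.List.pyGetD p x 0
    if px = x then x else pvRootF f p px

def pvRoot (p : List Int) (x : Int) : Int := pvRootF (x.toNat + 1) p x

def pvInv (p : List Int) : Prop :=
  ∀ (k : Nat) (h : k < p.length), 0 ≤ p[k] ∧ p[k] ≤ (k : Int)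

lemma pvGetD_bounds (p : List Int) (x : Int) (hinv : pvInv p) (hx0 : 0 ≤ x)
    (hxl : x < (p.length : Int)) :
    0 ≤ PySem.List.pyGetD p x 0 ∧ PySem.List.pyGetD p x 0 ≤ x := by
  have hlt : x.toNat < p.length := by omega
  rw [PySem.List.pyGetD_eq_getElem p 0 hx0 hxl]
  have := hinv x.toNat hlt
  omega

lemma pvRootF_bounds (f : Nat) : ∀ (p : List Int) (x : Int), pvInv p → 0 ≤ x →
    x < (p.length : Int) → 0 ≤ pvRootF f p x ∧ pvRootF f p x ≤ x := by
  induction f with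
  | zero => intro p x _ hx0 _; simp [pvRootF]; exact hx0
  | succ f IH =>
    intro p x hinv hx0 hxl
    have hb := pvGetD_bounds p x hinv hx0 hxl
    simp only [pvRootF]
    split
    · omega
    · rename_i hne
      have := IH p (PySem.List.pyGetD p x 0) hinv hb.1 (by omega)
      omega

lemma pvRootF_fuel (f : Nat) : ∀ (g : Nat) (p : List Int) (x : Int), pvInv p → 0 ≤ x →
    x < (p.length : Int) → x.toNat < f → x.toNat < g → pvRootF f p x = pvRootF g p x := by
  induction f with
  | zero => intro g p x _ _ _ h; omega
  | succ f IH =>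
    intro g p x hinv hx0 hxl hf hg
    match g with
    | 0 => omega
    | g+1 =>
      have hb := pvGetD_bounds p x hinv hx0 hxl
      simp only [pvRootF]
      split
      · rfl
      · rename_i hne
        exact IH g p _ hinv hb.1 (by omega) (by omega) (by omega)

lemma pvRoot_step (p : List Int) (x : Int) (hinv : pvInv p) (hx0 : 0 ≤ x)
    (hxl : x < (p.length : Int)) :
    pvRoot p x = if PySem.List.pyGetD p x 0 = x then x
                 else pvRoot p (PySem.List.pyGetD p x 0) := by
  have hb := pvGetD_bounds p x hinv hx0 hxl
  show pvRootF (x.toNat + 1) p x = _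
  simp only [pvRootF]
  split
  · rfl
  · rename_i hne
    exact pvRootF_fuel x.toNat _ p _ hinv hb.1 (by omega) (by omega) (by omega)

lemma pvRoot_bounds (p : List Int) (x : Int) (hinv : pvInv p) (hx0 : 0 ≤ x)
    (hxl : x < (p.length : Int)) : 0 ≤ pvRoot p x ∧ pvRoot p x ≤ x :=
  pvRootF_bounds _ p x hinv hx0 hxl

lemma pvRootF_fix (f : Nat) : ∀ (p : List Int) (x : Int), pvInv p → 0 ≤ x →
    x < (p.length : Int) → x.toNat < f →
    PySem.List.pyGetD p (pvRootF f p x) 0 = pvRootF f p x := by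
  induction f with
  | zero => intro p x _ _ _ h; omega
  | succ f IH =>
    intro p x hinv hx0 hxl hf
    have hb := pvGetD_bounds p x hinv hx0 hxl
    simp only [pvRootF]
    split
    · assumption
    · rename_i hne
      exact IH p _ hinv hb.1 (by omega) (by omega)

lemma pvRoot_fix (p : List Int) (x : Int) (hinv : pvInv p) (hx0 : 0 ≤ x)
    (hxl : x < (p.length : Int)) :
    PySem.List.pyGetD p (pvRoot p x) 0 = pvRoot p x :=
  pvRootF_fix _ p x hinv hx0 hxl (by omega)

lemma pvRoot_of_fix (p : List Int) (x : Int) (hinv : pvInv p) (hx0 : 0 ≤ x)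
    (hxl : x < (p.length : Int)) (hfix : PySem.List.pyGetD p x 0 = x) :
    pvRoot p x = x := by
  rw [pvRoot_step p x hinv hx0 hxl, if_pos hfix]

lemma pvFix_of_root_eq (p : List Int) (r : Int) (hinv : pvInv p) (hr0 : 0 ≤ r)
    (hrl : r < (p.length : Int)) (h : pvRoot p r = r) :
    PySem.List.pyGetD p r 0 = r := by
  by_contra hne
  have hb := pvGetD_bounds p r hinv hr0 hrl
  rw [pvRoot_step p r hinv hr0 hrl, if_neg hne] at h
  have := pvRoot_bounds p (PySem.List.pyGetD p r 0) hinv hb.1 (by omega)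
  omega

-- root of a root is itself
lemma pvRoot_root (p : List Int) (x : Int) (hinv : pvInv p) (hx0 : 0 ≤ x)
    (hxl : x < (p.length : Int)) : pvRoot p (pvRoot p x) = pvRoot p x := by
  have hb := pvRoot_bounds p x hinv hx0 hxl
  exact pvRoot_of_fix p _ hinv hb.1 (by omega) (pvRoot_fix p x hinv hx0 hxl)
-- continuation: depends on l1 content (will concatenate later)
lemma pvGetD_set (p : List Int) (x r y : Int) (hx0 : 0 ≤ x) (hy0 : 0 ≤ y)
    (hyl : y < (p.length : Int)) :
    PySem.List.pyGetD (PySem.List.pySetD p x r) y 0 =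
      if y = x then r else PySem.List.pyGetD p y 0 := by
  rw [PySem.List.pySetD_of_nonneg p r hx0]
  rw [PySem.List.pyGetD_eq_getElem _ 0 hy0 (by simpa using hyl),
      PySem.List.pyGetD_eq_getElem p 0 hy0 hyl]
  rw [List.getElem_set]
  by_cases h : y = x
  · simp [h]
  · have : x.toNat ≠ y.toNat ∨ x < 0 := by omega
    rcases this with h' | h'
    · simp [if_neg h, if_neg h']
    · omega

lemma pvInv_set (p : List Int) (x r : Int) (hinv : pvInv p) (hx0 : 0 ≤ x)
    (hr0 : 0 ≤ r) (hrx : r ≤ x) : pvInv (PySem.List.pySetD p x r) := by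
  rw [PySem.List.pySetD_of_nonneg p r hx0]
  intro k hk
  rw [List.getElem_set]
  split
  · rename_i he; constructor; exact hr0; simp at hk; omega
  · exact hinv k (by simpa using hk)

lemma pvRoot_set (p : List Int) (x r : Int) (hinv : pvInv p) (hx0 : 0 ≤ x)
    (hxl : x < (p.length : Int)) (hr0 : 0 ≤ r) (hrx : r ≤ x)
    (hfix : PySem.List.pyGetD p r 0 = r)
    (hcase : r = pvRoot p x ∨ PySem.List.pyGetD p x 0 = x) :
    pvInv (PySem.List.pySetD p x r) ∧
    (PySem.List.pySetD p x r).length = p.length ∧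
    ∀ y : Int, 0 ≤ y → y < (p.length : Int) →
      pvRoot (PySem.List.pySetD p x r) y =
        if pvRoot p y = pvRoot p x then r else pvRoot p y := by
  have hinv' := pvInv_set p x r hinv hx0 hr0 hrx
  have hlen : (PySem.List.pySetD p x r).length = p.length := PySem.List.length_pySetD p x r
  refine ⟨hinv', hlen, ?_⟩
  have H : ∀ m : Nat, ∀ y : Int, 0 ≤ y → y < (p.length : Int) → y.toNat = m →
      pvRoot (PySem.List.pySetD p x r) y =
        if pvRoot p y = pvRoot p x then r else pvRoot p y := by
    intro m
    induction m using Nat.strong_induction_on with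
    | _ m IH =>
      intro y hy0 hyl hm
      have hstep' := pvRoot_step (PySem.List.pySetD p x r) y hinv' hy0 (by omega)
      have hget := pvGetD_set p x r y hx0 hy0 hyl
      by_cases hyx : y = x
      · subst hyx
        rw [hget, if_pos rfl] at hstep'
        rw [if_pos rfl]
        by_cases hry : r = y
        · rw [hstep', if_pos hry]; omega
        · rw [hstep', if_neg hry]
          have hrfix' : PySem.List.pyGetD (PySem.List.pySetD p y r) r 0 = r := by
            rw [pvGetD_set p y r r hx0 hr0 (by omega)]
            rw [if_neg hry, hfix]
          exact pvRoot_of_fix _ r hinv' hr0 (by omega) hrfix'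
      · have hstep := pvRoot_step p y hinv hy0 hyl
        rw [hget, if_neg hyx] at hstep'
        by_cases hfy : PySem.List.pyGetD p y 0 = y
        · rw [hstep', if_pos hfy]
          rw [hstep, if_pos hfy]
          by_cases hc : y = pvRoot p x
          · rw [if_pos hc]
            rcases hcase with hc1 | hc2
            · omega
            · have : pvRoot p x = x := pvRoot_of_fix p x hinv hx0 hxl hc2
              omega
          · rw [if_neg hc]
        · have hb := pvGetD_bounds p y hinv hy0 hyl
          have hlt : (PySem.List.pyGetD p y 0).toNat < m := by omega
          rw [hstep', if_neg hfy, hstep, if_neg hfy]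
          rw [IH _ hlt _ hb.1 (by omega) rfl]
  intro y hy0 hyl
  exact H y.toNat y hy0 hyl rfl
lemma pvFindF_spec (f : Nat) : ∀ (p : List Int) (x : Int), pvInv p → 0 ≤ x →
    x < (p.length : Int) → x.toNat < f →
    (pvFindF f p x).2 = pvRoot p x ∧ pvInv (pvFindF f p x).1 ∧
    (pvFindF f p x).1.length = p.length ∧
    ∀ y : Int, 0 ≤ y → y < (p.length : Int) →
      pvRoot (pvFindF f p x).1 y = pvRoot p y := by
  induction f with
  | zero => intro p x _ _ _ h; omega
  | succ f IH =>
    intro p x hinv hx0 hxl hf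
    have hb := pvGetD_bounds p x hinv hx0 hxl
    have hstep := pvRoot_step p x hinv hx0 hxl
    simp only [pvFindF]
    split
    · rename_i hne
      set px := PySem.List.pyGetD p x 0 with hpx
      have hpxlt : px < x := by omega
      obtain ⟨hr, hi1, hl1, hroots⟩ := IH p px hinv hb.1 (by omega) (by omega)
      set pr := pvFindF f p px with hpr
      have hrx : pvRoot p x = pr.2 := by rw [hstep, if_neg hne, hr]
      have hrb := pvRoot_bounds p px hinv hb.1 (by omega)
      -- pr.2 = pvRoot p px is a root of pr.1
      have hrootr : pvRoot pr.1 pr.2 = pr.2 := by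
        rw [hroots pr.2 (by omega) (by omega), hr]
        exact pvRoot_root p px hinv hb.1 (by omega)
      have hfixr : PySem.List.pyGetD pr.1 pr.2 0 = pr.2 :=
        pvFix_of_root_eq pr.1 pr.2 hi1 (by omega) (by omega) hrootr
      obtain ⟨hi2, hl2, hroots2⟩ :=
        pvRoot_set pr.1 x pr.2 hi1 hx0 (by omega) (by omega) (by omega) hfixr
          (Or.inl (by rw [hroots x hx0 (by omega), hrx]))
      refine ⟨hrx.symm, hi2, ?_, ?_⟩
      · show (PySem.List.pySetD pr.1 x pr.2).length = p.length
        omega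
      intro y hy0 hyl
      show pvRoot (PySem.List.pySetD pr.1 x pr.2) y = _
      rw [hroots2 y hy0 (by omega)]
      rw [hroots y hy0 (by omega), hroots x hx0 (by omega), hrx, hr]
      split <;> rename_i h
      · rw [h]
      · rfl
    · rename_i hne
      have : PySem.List.pyGetD p x 0 = x := by omega
      refine ⟨by rw [hstep, if_pos this], hinv, rfl, fun y _ _ => rfl⟩

lemma pvFindP_spec (p : List Int) (x : Int) (hinv : pvInv p) (hx0 : 0 ≤ x)
    (hxl : x < (p.length : Int)) :
    (pvFindP p x).2 = pvRoot p x ∧ pvInv (pvFindP p x).1 ∧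
    (pvFindP p x).1.length = p.length ∧
    ∀ y : Int, 0 ≤ y → y < (p.length : Int) →
      pvRoot (pvFindP p x).1 y = pvRoot p y :=
  pvFindF_spec (x.toNat + 1) p x hinv hx0 hxl (by omega)

lemma pvUnionP_spec (p : List Int) (a b : Int) (hinv : pvInv p)
    (ha0 : 0 ≤ a) (hal : a < (p.length : Int)) (hb0 : 0 ≤ b) (hbl : b < (p.length : Int)) :
    pvInv (pvUnionP p a b) ∧ (pvUnionP p a b).length = p.length ∧
    ∀ y : Int, 0 ≤ y → y < (p.length : Int) →
      pvRoot (pvUnionP p a b) y =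
        if pvRoot p y = pvRoot p a ∨ pvRoot p y = pvRoot p b
        then min (pvRoot p a) (pvRoot p b) else pvRoot p y := by
  obtain ⟨hra, hia, hla, hrootsa⟩ := pvFindP_spec p a hinv ha0 hal
  set fa := pvFindP p a with hfa
  obtain ⟨hrb, hib, hlb, hrootsb⟩ := pvFindP_spec fa.1 b hia hb0 (by omega)
  set fb := pvFindP fa.1 b with hfb
  have hrb' : fb.2 = pvRoot p b := by rw [hrb, hrootsa b hb0 (by omega)]
  have hroots2 : ∀ y : Int, 0 ≤ y → y < (p.length : Int) → pvRoot fb.1 y = pvRoot p y := by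
    intro y hy0 hyl
    rw [hrootsb y hy0 (by omega), hrootsa y hy0 hyl]
  have hba := pvRoot_bounds p a hinv ha0 hal
  have hbb := pvRoot_bounds p b hinv hb0 hbl
  -- roots of p are fixpoints of fb.1
  have hfixa : PySem.List.pyGetD fb.1 (pvRoot p a) 0 = pvRoot p a := by
    apply pvFix_of_root_eq fb.1 _ hib hba.1 (by omega)
    rw [hroots2 _ hba.1 (by omega)]
    exact pvRoot_root p a hinv ha0 hal
  have hfixb : PySem.List.pyGetD fb.1 (pvRoot p b) 0 = pvRoot p b := by
    apply pvFix_of_root_eq fb.1 _ hib hbb.1 (by omega)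
    rw [hroots2 _ hbb.1 (by omega)]
    exact pvRoot_root p b hinv hb0 hbl
  have hrootfa : pvRoot fb.1 (pvRoot p a) = pvRoot p a := by
    rw [hroots2 _ hba.1 (by omega)]; exact pvRoot_root p a hinv ha0 hal
  have hrootfb : pvRoot fb.1 (pvRoot p b) = pvRoot p b := by
    rw [hroots2 _ hbb.1 (by omega)]; exact pvRoot_root p b hinv hb0 hbl
  have hgoal : pvUnionP p a b =
      if fa.2 < fb.2 then PySem.List.pySetD fb.1 fb.2 fa.2
      else PySem.List.pySetD fb.1 fa.2 fb.2 := rfl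
  rw [hgoal]
  split <;> rename_i hcmp
  · -- fa.2 < fb.2 : parent[fb.2] = fa.2
    rw [hra] at hcmp; rw [hrb'] at hcmp
    obtain ⟨hi3, hl3, hroots3⟩ :=
      pvRoot_set fb.1 (pvRoot p b) (pvRoot p a) hib hbb.1 (by omega) hba.1 (by omega)
        hfixa (Or.inr hfixb)
    rw [hra, hrb']
    refine ⟨hi3, by omega, ?_⟩
    intro y hy0 hyl
    rw [hroots3 y hy0 (by omega), hroots2 y hy0 hyl, hrootfb]
    have hmin : min (pvRoot p a) (pvRoot p b) = pvRoot p a := by omega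
    rw [hmin]
    by_cases h1 : pvRoot p y = pvRoot p b
    · rw [if_pos h1, if_pos (Or.inr h1)]
    · rw [if_neg h1]
      by_cases h2 : pvRoot p y = pvRoot p a
      · rw [if_pos (Or.inl h2), h2]
      · rw [if_neg (by tauto)]
  · -- parent[fa.2] = fb.2
    rw [hra] at hcmp; rw [hrb'] at hcmp
    obtain ⟨hi3, hl3, hroots3⟩ :=
      pvRoot_set fb.1 (pvRoot p a) (pvRoot p b) hib hba.1 (by omega) hbb.1 (by omega)
        hfixb (Or.inr hfixa)
    rw [hra, hrb']
    refine ⟨hi3, by omega, ?_⟩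
    intro y hy0 hyl
    rw [hroots3 y hy0 (by omega), hroots2 y hy0 hyl, hrootfa]
    have hmin : min (pvRoot p a) (pvRoot p b) = pvRoot p b := by omega
    rw [hmin]
    by_cases h2 : pvRoot p y = pvRoot p a
    · rw [if_pos h2, if_pos (Or.inl h2)]
    · rw [if_neg h2]
      by_cases h1 : pvRoot p y = pvRoot p b
      · rw [if_pos (Or.inr h1), h1]
      · rw [if_neg (by tauto)]
lemma pvMergeB_length (comp : List Int) (la lb : Int) :
    (pvMergeB comp la lb).length = comp.length := by simp [pvMergeB]

lemma pvMergeB_getD (comp : List Int) (la lb y : Int) (hy0 : 0 ≤ y)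
    (hyl : y < (comp.length : Int)) :
    PySem.List.pyGetD (pvMergeB comp la lb) y 0 =
      if PySem.List.pyGetD comp y 0 = la ∨ PySem.List.pyGetD comp y 0 = lb
      then min la lb else PySem.List.pyGetD comp y 0 := by
  rw [PySem.List.pyGetD_eq_getElem _ 0 hy0 (by rw [pvMergeB_length]; omega),
      PySem.List.pyGetD_eq_getElem comp 0 hy0 hyl]
  simp [pvMergeB]

def pvRel (N : Nat) (parent comp : List Int) : Prop :=
  pvInv parent ∧ parent.length = N ∧ comp.length = N ∧
  ∀ y : Int, 0 ≤ y → y < (N : Int) →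
    PySem.List.pyGetD comp y 0 = pvRoot parent y

lemma pvRel_union_merge (N : Nat) (parent comp : List Int) (a b : Int)
    (h : pvRel N parent comp) (ha0 : 0 ≤ a) (hal : a < (N : Int))
    (hb0 : 0 ≤ b) (hbl : b < (N : Int)) :
    pvRel N (pvUnionP parent a b)
      (pvMergeB comp (PySem.List.pyGetD comp a 0) (PySem.List.pyGetD comp b 0)) := by
  obtain ⟨hinv, hlp, hlc, hpt⟩ := h
  obtain ⟨hi, hl, hroots⟩ :=
    pvUnionP_spec parent a b hinv ha0 (by omega) hb0 (by omega)
  refine ⟨hi, by omega, by rw [pvMergeB_length]; omega, ?_⟩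
  intro y hy0 hyl
  rw [pvMergeB_getD comp _ _ y hy0 (by omega), hroots y hy0 (by omega),
      hpt a ha0 hal, hpt b hb0 hbl, hpt y hy0 hyl]

lemma pvFoldlRel {α β ι : Type} (R : α → β → Prop) (fA : α → ι → α) (fB : β → ι → β) :
    ∀ (l : List ι) (a : α) (b : β), R a b →
      (∀ x y i, i ∈ l → R x y → R (fA x i) (fB y i)) →
      R (l.foldl fA a) (l.foldl fB b) := by
  intro l
  induction l with
  | nil => intro a b h _; exact h
  | cons hd tl IH =>
    intro a b h hstep
    exact IH _ _ (hstep a b hd (by simp) h)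
      (fun x y i hi hr => hstep x y i (by simp [hi]) hr)

def pvRelScan (N : Nat) (sA sB : List Int × List (Int × Int × Int)) : Prop :=
  pvRel N sA.1 sB.1 ∧ sA.2 = sB.2 ∧
  ∀ e ∈ sA.2, (0 ≤ e.2.1 ∧ e.2.1 < (N : Int)) ∧ (0 ≤ e.2.2 ∧ e.2.2 < (N : Int))

lemma pvBlock_bounds (n i j : Int) (hi : 0 ≤ i) (hi2 : i < n) (hj : 0 ≤ j) (hj2 : j < n) :
    0 ≤ i * n + j ∧ i * n + j < n * n := by
  constructor
  · have : 0 ≤ i * n := mul_nonneg hi (by omega)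
    omega
  · have h1 : i * n + j < (i + 1) * n := by ring_nf; omega
    have h2 : (i + 1) * n ≤ n * n := by
      have := mul_le_mul_of_nonneg_right (show i + 1 ≤ n by omega) (show (0:Int) ≤ n by omega)
      linarith
    omega

lemma pvScan_dir_step (land : List (List Int)) (height n i j d dx dy : Int) (N : Nat)
    (hN : (N : Int) = n * n)
    (hdx : PySem.List.pyGetD [-1, 1, 0, 0] d 0 = dx)
    (hdy : PySem.List.pyGetD [0, 0, -1, 1] d 0 = dy)
    (hi : 0 ≤ i) (hi2 : i < n) (hj : 0 ≤ j) (hj2 : j < n)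
    (sA sB : List Int × List (Int × Int × Int)) (h : pvRelScan N sA sB) :
    pvRelScan N (pvScanStepA land height n i j sA d)
      (pvScanStepB land height n i j sB (dx, dy)) := by
  simp only [pvScanStepA, pvScanStepB, hdx, hdy, ge_iff_le, pvLandA]
  split_ifs with hc hw
  · -- in bounds, free union / merge
    obtain ⟨hc1, hc2, hc3, hc4⟩ := hc
    obtain ⟨hb1, hb2⟩ := pvBlock_bounds n i j hi hi2 hj hj2
    obtain ⟨hb3, hb4⟩ := pvBlock_bounds n (i + dx) (j + dy) hc1 hc2 hc3 hc4
    exact ⟨pvRel_union_merge N sA.1 sB.1 _ _ h.1 hb1 (by omega) hb3 (by omega),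
      h.2.1, h.2.2⟩
  · -- in bounds, expensive edge appended
    obtain ⟨hc1, hc2, hc3, hc4⟩ := hc
    obtain ⟨hb1, hb2⟩ := pvBlock_bounds n i j hi hi2 hj hj2
    obtain ⟨hb3, hb4⟩ := pvBlock_bounds n (i + dx) (j + dy) hc1 hc2 hc3 hc4
    refine ⟨h.1, by rw [h.2.1], ?_⟩
    intro e he
    rcases List.mem_append.mp he with he1 | he2
    · exact h.2.2 e he1
    · simp at he2
      subst he2
      exact ⟨⟨hb1, show (i * n + j : Int) < (N : Int) by omega⟩,
        hb3, show ((i + dx) * n + (j + dy) : Int) < (N : Int) by omega⟩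
  · exact h

lemma pvScan_ij_step (land : List (List Int)) (height n i j : Int) (N : Nat)
    (hN : (N : Int) = n * n)
    (hi : 0 ≤ i) (hi2 : i < n) (hj : 0 ≤ j) (hj2 : j < n)
    (sA sB : List Int × List (Int × Int × Int)) (h : pvRelScan N sA sB) :
    pvRelScan N ((PySem.List.pyRange 0 4 1).foldl (pvScanStepA land height n i j) sA)
      ([((-1 : Int), (0 : Int)), (1, 0), (0, -1), (0, 1)].foldl
        (pvScanStepB land height n i j) sB) := by
  have h4 : PySem.List.pyRange 0 4 1 = [0, 1, 2, 3] := by decide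
  rw [h4]
  simp only [List.foldl]
  exact pvScan_dir_step land height n i j 3 0 1 N hN (by decide) (by decide) hi hi2 hj hj2 _ _
    (pvScan_dir_step land height n i j 2 0 (-1) N hN (by decide) (by decide) hi hi2 hj hj2 _ _
      (pvScan_dir_step land height n i j 1 1 0 N hN (by decide) (by decide) hi hi2 hj hj2 _ _
        (pvScan_dir_step land height n i j 0 (-1) 0 N hN (by decide) (by decide) hi hi2 hj hj2 _ _ h)))

lemma pvInit_rel (N : Nat) (n : Int) (hN : (N : Int) = n * n) :
    pvRel N (PySem.List.pyRange 0 (n * n) 1) (PySem.List.pyRange 0 (n * n) 1) := by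
  have hlen : (PySem.List.pyRange 0 (n * n) 1).length = N := by
    rw [PySem.List.length_pyRange_one]; omega
  have hget : ∀ y : Int, 0 ≤ y → y < (N : Int) →
      PySem.List.pyGetD (PySem.List.pyRange 0 (n * n) 1) y 0 = y := by
    intro y hy0 hyl
    rw [PySem.List.pyGetD_eq_getElem _ 0 hy0 (by omega)]
    rw [PySem.List.getElem_pyRange_one]
    omega
  have hinv : pvInv (PySem.List.pyRange 0 (n * n) 1) := by
    intro k hk
    rw [PySem.List.getElem_pyRange_one]
    omega
  refine ⟨hinv, hlen, hlen, ?_⟩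
  intro y hy0 hyl
  rw [hget y hy0 hyl]
  exact (pvRoot_of_fix _ y hinv hy0 (by omega) (hget y hy0 hyl)).symm
def pvRelK (N : Nat) (x y : Int × List Int) : Prop := x.1 = y.1 ∧ pvRel N x.2 y.2

lemma pvKruskal_step (N : Nat) (e : Int × Int × Int) (x y : Int × List Int)
    (hr : pvRelK N x y)
    (hb : (0 ≤ e.2.1 ∧ e.2.1 < (N : Int)) ∧ (0 ≤ e.2.2 ∧ e.2.2 < (N : Int))) :
    pvRelK N
      (let f1 := pvFindP x.2 e.2.1
       let f2 := pvFindP f1.1 e.2.2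
       if f1.2 ≠ f2.2 then (x.1 + e.1, pvUnionP f2.1 e.2.1 e.2.2) else (x.1, f2.1))
      (let la := PySem.List.pyGetD y.2 e.2.1 0
       let lb := PySem.List.pyGetD y.2 e.2.2 0
       if la ≠ lb then (y.1 + e.1, pvMergeB y.2 la lb) else y) := by
  obtain ⟨hans, hinv, hlp, hlc, hpt⟩ := hr
  obtain ⟨⟨hb1, hb2⟩, hb3, hb4⟩ := hb
  obtain ⟨hr1, hi1, hl1, hroots1⟩ := pvFindP_spec x.2 e.2.1 hinv hb1 (by omega)
  obtain ⟨hr2, hi2, hl2, hroots2⟩ :=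
    pvFindP_spec (pvFindP x.2 e.2.1).1 e.2.2 hi1 hb3 (by omega)
  have hla : PySem.List.pyGetD y.2 e.2.1 0 = (pvFindP x.2 e.2.1).2 := by
    rw [hpt e.2.1 hb1 hb2, hr1]
  have hlb : PySem.List.pyGetD y.2 e.2.2 0 = (pvFindP (pvFindP x.2 e.2.1).1 e.2.2).2 := by
    rw [hpt e.2.2 hb3 hb4, hr2, hroots1 e.2.2 hb3 (by omega)]
  have hrel2 : pvRel N (pvFindP (pvFindP x.2 e.2.1).1 e.2.2).1 y.2 := by
    refine ⟨hi2, by omega, hlc, ?_⟩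
    intro z hz0 hzl
    rw [hpt z hz0 hzl, hroots2 z hz0 (by omega), hroots1 z hz0 (by omega)]
  simp only [pvRelK]
  split_ifs with h1 h2 h3
  · exact ⟨by rw [hans],
      pvRel_union_merge N (pvFindP (pvFindP x.2 e.2.1).1 e.2.2).1 y.2 e.2.1 e.2.2
        hrel2 hb1 hb2 hb3 hb4⟩
  · rw [hla, hlb] at h2; exact absurd h1 h2
  · rw [hla, hlb] at h3; exact absurd h3 h1
  · exact ⟨hans, hrel2⟩
theorem solution_eq_alt : ∀ (land : List (List Int)) (height : Int),
    solution land height = solution_alt land height := by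
  intro land height
  simp only [solution, solution_alt]
  have hpow : ((land.length : Int)) ^ 2 = (land.length : Int) * (land.length : Int) := sq _
  rw [hpow]
  set n : Int := (land.length : Int) with hn
  set N : Nat := land.length * land.length with hNdef
  have hN : (N : Int) = n * n := by rw [hNdef, hn]; push_cast; ring
  set c0 := PySem.List.pyRange 0 (n * n) 1 with hc0
  have hrelInit : pvRelScan N (c0, ([] : List (Int × Int × Int))) (c0, []) :=
    ⟨pvInit_rel N n hN, rfl, by simp⟩
  have hscan := pvFoldlRel (pvRelScan N)
    (fun st i => (PySem.List.pyRange 0 n 1).foldl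
      (fun st j => (PySem.List.pyRange 0 4 1).foldl (pvScanStepA land height n i j) st) st)
    (fun st i => (PySem.List.pyRange 0 n 1).foldl
      (fun st j => [((-1 : Int), (0 : Int)), (1, 0), (0, -1), (0, 1)].foldl
        (pvScanStepB land height n i j) st) st)
    (PySem.List.pyRange 0 n 1) (c0, []) (c0, []) hrelInit
    (fun sA sB i hi hr =>
      pvFoldlRel (pvRelScan N) _ _ (PySem.List.pyRange 0 n 1) sA sB hr
        (fun sA' sB' j hj hr' =>
          pvScan_ij_step land height n i j N hN
            (PySem.List.mem_pyRange_one.mp hi).1 (PySem.List.mem_pyRange_one.mp hi).2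
            (PySem.List.mem_pyRange_one.mp hj).1 (PySem.List.mem_pyRange_one.mp hj).2
            sA' sB' hr'))
  obtain ⟨hrel, hpath, hrange⟩ := hscan
  rw [hpath] at hrange ⊢
  refine (pvFoldlRel (pvRelK N) _ _ _ _ _ ?hinit ?hstep).1
  case hinit => exact ⟨rfl, hrel⟩
  case hstep =>
    intro x y e he hr
    exact pvKruskal_step N e x y hr (hrange e ((PySem.List.mem_sorted _ _ _ _).mp he))

-- ===== VERDICT (by name: the statement is the Claim_ definition above) =====
theorem solution_spec : Claim_equal_solution := by
  intro land height _hdom _hpre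
  exact solution_eq_alt land height
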